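-- pv_equiv track=rewrite | github.com/blazingbhavneek/cBench | SWE-smith/swesmith/fix_gen/fix_gen.py | get_modified_files
-- ===== SOURCE A (Python) =====
-- def get_modified_files(patch):
--     """Get set of files modified in a patch"""
--     import re
--     files = set()
--     for line in patch.split('\n'):
--         if line.startswith('--- a/'):
--             files.add(line[6:])  # Remove '--- a/' prefix
--         elif line.startswith('+++ b/'):
--             files.add(line[6:])  # Remove '+++ b/' prefix
--     return files
-- ===== SOURCE B (Python) =====
-- def get_modified_files(patch):
--     """Get set of files modified in a patch"""
--     import re
--     return set(re.findall(r'^(?:--- a/|\+\+\+ b/)(.*)$', patch, re.MULTILINE))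
-- ===== Notes on version B (the rewrite author's own statement) =====
-- stated objective: idiomatic
-- what changed: Replaced the explicit split('\n') loop with startswith branches and incremental set.add by a single multiline regex scan: set(re.findall(r'^(?:--- a/|\+\+\+ b/)(.*)$', patch, re.MULTILINE)); the pattern engine does the per-character traversal and capture, and the matches are deduplicated once at the end.
import Mathlib
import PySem

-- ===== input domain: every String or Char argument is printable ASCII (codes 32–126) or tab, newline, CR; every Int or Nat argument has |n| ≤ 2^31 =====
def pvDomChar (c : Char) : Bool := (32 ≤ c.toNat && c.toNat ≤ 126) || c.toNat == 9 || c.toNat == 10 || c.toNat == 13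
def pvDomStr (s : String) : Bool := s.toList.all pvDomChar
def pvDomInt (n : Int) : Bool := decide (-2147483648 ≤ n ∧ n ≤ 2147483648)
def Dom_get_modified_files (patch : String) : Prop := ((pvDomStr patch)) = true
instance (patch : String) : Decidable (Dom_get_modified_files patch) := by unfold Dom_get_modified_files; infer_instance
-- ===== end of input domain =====

-- B replaces A's per-line split/startswith loop and incremental set.add by one multiline-regex scan
-- whose matches are collected into a set at the end (idiomatic; same cost).

-- ===== PORT A =====
-- patch.split('\n') is PySem.Chars.splitOn on the code points; each piece becomes a String again.
def get_modified_files (patch : String) : List String :=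
  ((PySem.Chars.splitOn patch.toList ['\n']).map String.ofList).foldl
    (fun files line =>
      if PySem.Str.startswith line "--- a/" then
        PySem.Set.add files (PySem.Str.slice line (some 6) none)   -- line[6:]
      else if PySem.Str.startswith line "+++ b/" then
        PySem.Set.add files (PySem.Str.slice line (some 6) none)   -- line[6:]
      else files)
    PySem.Set.empty

-- ===== PORT B =====
-- Hand port of the regex scan re.findall(r'^(?:--- a/|\+\+\+ b/)(.*)$', patch, re.MULTILINE):
-- at each line start (start of string or just after a '\n') the engine tries the two literal
-- alternatives and '(.*)$' captures up to the next '\n'; exact because '.' never matches '\n'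
-- and MULTILINE makes '^'/'$' anchor exactly at '\n' boundaries.
def pvScan (cs : List Char) : List (List Char) :=
  let line := cs.takeWhile (fun c => c != '\n')          -- what '(.*)$' can see from this anchor
  let m := if ("--- a/".toList.isPrefixOf line || "+++ b/".toList.isPrefixOf line)
           then [line.drop 6] else []                    -- the capture group, if the alternation matched
  match h : cs.dropWhile (fun c => c != '\n') with
  | [] => m                                              -- no further '\n': no more anchors
  | _ :: t => m ++ pvScan t                              -- resume just after the '\n'
termination_by cs.length
decreasing_by
  have h1 : (cs.dropWhile (fun c => c != '\n')).length ≤ cs.length :=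
    List.length_dropWhile_le _ _
  rw [h] at h1; simp at h1; omega

def get_modified_files_alt (patch : String) : List String :=
  PySem.Set.ofList ((pvScan patch.toList).map String.ofList)   -- set(findall(...))

-- ===== PRECONDITION & SPEC =====
def Spec_get_modified_files (patch : String) (out : List String) : Prop := out = get_modified_files_alt patch
instance (patch : String) (out : List String) : Decidable (Spec_get_modified_files patch out) := by unfold Spec_get_modified_files; infer_instance

-- ===== CLAIM (what is proved, stated in full; the proofs are below) =====
def Claim_equal_get_modified_files : Prop := ∀ (patch : String), Dom_get_modified_files patch → Spec_get_modified_files patch (get_modified_files patch)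

-- ===== LEMMAS AND PROOFS =====

-- the '\n'-separated pieces of cs, in pvScan's recursion shape (proof-only)
def pvLines (cs : List Char) : List (List Char) :=
  (cs.takeWhile (fun c => c != '\n')) ::
    (match h : cs.dropWhile (fun c => c != '\n') with
     | [] => []
     | _ :: t => pvLines t)
termination_by cs.length
decreasing_by
  have h1 : (cs.dropWhile (fun c => c != '\n')).length ≤ cs.length :=
    List.length_dropWhile_le _ _
  rw [h] at h1; simp at h1; omega

-- per-line contribution, char level
def pvG (line : List Char) : List (List Char) :=
  if ("--- a/".toList.isPrefixOf line || "+++ b/".toList.isPrefixOf line)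
  then [line.drop 6] else []

-- per-line contribution, String level (matches A's branches)
def pvGS (line : String) : List String :=
  if (PySem.Str.startswith line "--- a/" || PySem.Str.startswith line "+++ b/")
  then [PySem.Str.slice line (some 6) none] else []

lemma pvLines_unfold_nil (cs : List Char) (h : cs.dropWhile (fun c => c != '\n') = []) :
    pvLines cs = [cs.takeWhile (fun c => c != '\n')] := by
  rw [pvLines]
  split
  · rfl
  · rename_i a t heq
    rw [h] at heq; cases heq

lemma pvLines_unfold_cons (cs : List Char) {a : Char} {t : List Char}
    (h : cs.dropWhile (fun c => c != '\n') = a :: t) :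
    pvLines cs = cs.takeWhile (fun c => c != '\n') :: pvLines t := by
  rw [pvLines]
  split
  · rename_i heq
    rw [h] at heq; cases heq
  · rename_i a' t' heq
    rw [h] at heq
    cases heq
    rfl

lemma pvScan_unfold_nil (cs : List Char) (h : cs.dropWhile (fun c => c != '\n') = []) :
    pvScan cs = pvG (cs.takeWhile (fun c => c != '\n')) := by
  rw [pvScan]
  split
  · simp [pvG]
  · rename_i a t heq
    rw [h] at heq; cases heq

lemma pvScan_unfold_cons (cs : List Char) {a : Char} {t : List Char}
    (h : cs.dropWhile (fun c => c != '\n') = a :: t) :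
    pvScan cs = pvG (cs.takeWhile (fun c => c != '\n')) ++ pvScan t := by
  rw [pvScan]
  split
  · rename_i heq
    rw [h] at heq; cases heq
  · rename_i a' t' heq
    rw [h] at heq
    cases heq
    simp [pvG]

lemma pvScan_eq_flatMap (cs : List Char) : pvScan cs = (pvLines cs).flatMap pvG := by
  cases h : cs.dropWhile (fun c => c != '\n') with
  | nil =>
    rw [pvScan_unfold_nil cs h, pvLines_unfold_nil cs h]
    simp
  | cons a t =>
    rw [pvScan_unfold_cons cs h, pvLines_unfold_cons cs h, pvScan_eq_flatMap t]
    simp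
termination_by cs.length
decreasing_by
  have h1 : (cs.dropWhile (fun c => c != '\n')).length ≤ cs.length :=
    List.length_dropWhile_le _ _
  rw [h] at h1; simp at h1; omega

lemma pvGo_eq (fuel : Nat) :
    ∀ (l cur : List Char) (accs : List (List Char)), l.length < fuel →
      PySem.Chars.splitOn.go ['\n'] fuel l cur accs =
        accs.reverse ++ (pvLines l).modifyHead (cur.reverse ++ ·) := by
  induction fuel with
  | zero => intro l cur accs h; omega
  | succ fuel ih =>
    intro l cur accs hlen
    rw [PySem.Chars.splitOn.go.eq_def]
    cases l with
    | nil =>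
      rw [pvLines_unfold_nil [] (by simp)]
      simp [List.modifyHead]
    | cons c rest =>
      have hlen' : rest.length < fuel := by
        simpa using Nat.lt_of_succ_lt_succ hlen
      by_cases hc : c = '\n'
      · subst hc
        have hpre : (['\n'] : List Char).isPrefixOf ('\n' :: rest) = true := by
          simp [List.isPrefixOf]
        simp only [hpre, if_true, List.length_cons, List.length_nil,
          List.drop_succ_cons, List.drop_zero]
        rw [ih rest [] _ hlen']
        rw [pvLines_unfold_cons ('\n' :: rest) (show _ = '\n' :: rest by simp)]
        cases hd : rest.dropWhile (fun c => c != '\n') with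
        | nil =>
          rw [pvLines_unfold_nil rest hd]
          simp [List.modifyHead]
        | cons a t =>
          rw [pvLines_unfold_cons rest hd]
          simp [List.modifyHead]
      · have hpre : (['\n'] : List Char).isPrefixOf (c :: rest) = false := by
          simp [List.isPrefixOf]
          exact fun hh => (hc hh.symm).elim
        simp only [hpre, Bool.false_eq_true, if_false]
        rw [ih rest (c :: cur) _ hlen']
        cases hd : rest.dropWhile (fun c => c != '\n') with
        | nil =>
          rw [pvLines_unfold_nil rest hd,
            pvLines_unfold_nil (c :: rest) (by simp [hc, hd]),
            List.takeWhile_cons]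
          simp [hc, List.modifyHead]
        | cons a t =>
          rw [pvLines_unfold_cons rest hd,
            pvLines_unfold_cons (c :: rest) (show _ = a :: t by simp [hc, hd]),
            List.takeWhile_cons]
          simp [hc, List.modifyHead]

lemma pvSplitOn_eq (cs : List Char) : PySem.Chars.splitOn cs ['\n'] = pvLines cs := by
  show PySem.Chars.splitOn.go ['\n'] (cs.length + 1) cs [] [] = pvLines cs
  rw [pvGo_eq (cs.length + 1) cs [] [] (by omega)]
  rw [pvLines]
  simp [List.modifyHead]

lemma pvSlice6 (s : String) :
    PySem.Str.slice s (some 6) none = String.ofList (s.toList.drop 6) := by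
  have h1 : (PySem.Str.slice s (some 6) none).toList = s.toList.drop 6 := by
    rw [PySem.Str.toList_slice, PySem.Chars.slice_eq_listSlice,
      PySem.List.slice_from _ (by norm_num : (0 : Int) ≤ 6)]
    simp
  have h2 := congrArg String.ofList h1
  rwa [String.ofList_toList] at h2

lemma pvGS_mk (l : List Char) : pvGS (String.ofList l) = (pvG l).map String.ofList := by
  simp only [pvGS, pvG, PySem.Str.startswith_eq, PySem.Chars.startswith,
    String.toList_ofList, pvSlice6]
  split <;> simp

lemma pvFoldl_eq (lines : List String) (s : PySem.Set String) :
    lines.foldl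
      (fun files line =>
        if PySem.Str.startswith line "--- a/" then
          PySem.Set.add files (PySem.Str.slice line (some 6) none)
        else if PySem.Str.startswith line "+++ b/" then
          PySem.Set.add files (PySem.Str.slice line (some 6) none)
        else files) s
      = PySem.Set.update s (lines.flatMap pvGS) := by
  induction lines generalizing s with
  | nil => simp [PySem.Set.update]
  | cons a l ih =>
    simp only [List.foldl_cons, List.flatMap_cons]
    rw [ih]
    have hupd : ∀ (xs ys : List String) (t : PySem.Set String),
        PySem.Set.update t (xs ++ ys) = PySem.Set.update (PySem.Set.update t xs) ys := by
      intro xs ys t; simp [PySem.Set.update, List.foldl_append]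
    rw [hupd]
    congr 1
    by_cases h1 : PySem.Chars.startswith a.toList ['-', '-', '-', ' ', 'a', '/'] = true <;>
      by_cases h2 : PySem.Chars.startswith a.toList ['+', '+', '+', ' ', 'b', '/'] = true <;>
        simp [pvGS, PySem.Str.startswith_eq, h1, h2, PySem.Set.update]

-- ===== VERDICT (by name: the statement is the Claim_ definition above) =====
theorem get_modified_files_spec : Claim_equal_get_modified_files := by
  intro patch _
  unfold Spec_get_modified_files get_modified_files get_modified_files_alt
  rw [pvFoldl_eq, pvSplitOn_eq, List.flatMap_map]
  simp only [pvGS_mk]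
  rw [← List.map_flatMap, ← pvScan_eq_flatMap]
  simp [PySem.Set.ofList_eq_foldl, PySem.Set.update, PySem.Set.empty]
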